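-- pv_equiv track=rewrite | github.com/BoB14th-AparT/A3-GUI | Logic/Dynamic/cleanup_dynamic_corrupted.py | extract_valid_paths
-- ===== SOURCE A (Python) =====
-- def has_corrupted_chars(text: str) -> bool:
--     """
--     문자열에 깨진 문자(제어 문자, non-printable)가 있는지 확인
--     """
--     for char in text:
--         code = ord(char)
--         # 제어 문자 (0x00-0x1F, 0x7F-0x9F) 제외
--         if code < 0x20 or (0x7F <= code <= 0x9F):
--             return True
--         # Unicode replacement character (깨진 문자 표시)
--         if char == '\ufffd':
--             return True
--     return False
--
-- def is_path_root(segment: str) -> bool: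
--     """
--     세그먼트가 새로운 경로의 시작점인지 확인
--     """
--     # 정확한 매칭
--     if segment in ['data', 'sdcard', 'storage']:
--         return True
--
--     # 접두사 매칭
--     if segment.startswith('emulated'):
--         return True
--
--     return False
--
-- def extract_valid_paths(path: str) -> list:
--     """
--     경로에서 깨진 세그먼트 제거하고, 중간에 새 경로 루트가 나오면 분리
--
--     반환: 유효한 경로들의 리스트
--     """
--     if not path:
--         return []
--
--     # 경로를 '/'로 분리
--     segments = path.split('/')
--
--     results = []
--     current_path = []
--     found_root = False  # 첫 번째 루트를 찾았는지
--
--     for i, seg in enumerate(segments):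
--         # 빈 세그먼트 (맨 앞 / 때문에 생기는)
--         if not seg:
--             current_path.append(seg)
--             continue
--
--         # 깨진 세그먼트 발견
--         if has_corrupted_chars(seg):
--             # 현재까지 모은 경로가 있으면 저장
--             if current_path and len(current_path) > 1:  # 최소한 / 외에 뭔가 있어야
--                 path_str = '/'.join(current_path)
--                 if path_str and path_str != '/':
--                     results.append(path_str)
--
--             # 현재 경로 초기화
--             current_path = []
--             found_root = False
--             continue
--
--         # 새로운 경로 루트 발견 (첫 루트가 아닌 경우)
--         if found_root and is_path_root(seg):
--             # 이전 경로 저장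
--             if current_path and len(current_path) > 1:
--                 path_str = '/'.join(current_path)
--                 if path_str and path_str != '/':
--                     results.append(path_str)
--
--             # 새 경로 시작
--             current_path = ['', seg]  # /로 시작
--             found_root = True
--         else:
--             # 정상 세그먼트 추가
--             current_path.append(seg)
--
--             # 루트 세그먼트 확인
--             if is_path_root(seg):
--                 found_root = True
--
--     # 마지막 경로 저장
--     if current_path and len(current_path) > 1:
--         path_str = '/'.join(current_path)
--         if path_str and path_str != '/':
--             results.append(path_str)
--
--     return results
-- ===== SOURCE B (Python) =====
-- def has_corrupted_chars(text: str) -> bool: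
--     return any(ord(c) < 0x20 or 0x7F <= ord(c) <= 0x9F or c == '\ufffd' for c in text)
--
-- def is_path_root(segment: str) -> bool:
--     return segment in ('data', 'sdcard', 'storage') or segment.startswith('emulated')
--
-- def _runs(segs):
--     # corrupted segments act as delimiters: recursively split the segment list on them
--     for i, s in enumerate(segs):
--         if has_corrupted_chars(s):
--             return [segs[:i]] + _runs(segs[i + 1:])
--     return [segs]
--
-- def _groups(run):
--     # first group extends through the first root; each later root starts a ''-prefixed group
--     for i, s in enumerate(run):
--         if is_path_root(s):
--             return _chop(run[:i + 1], run[i + 1:])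
--     return [run]
--
-- def _chop(acc, rest):
--     for i, s in enumerate(rest):
--         if is_path_root(s):
--             return [acc + rest[:i]] + _chop([''] + [s], rest[i + 1:])
--     return [acc + rest]
--
-- def extract_valid_paths(path: str) -> list:
--     if not path:
--         return []
--     groups = [g for run in _runs(path.split('/')) for g in _groups(run)]
--     paths = ['/'.join(g) for g in groups if len(g) > 1]
--     return [p for p in paths if p and p != '/']
-- ===== Notes on version B (the rewrite author's own statement) =====
-- stated objective: alternative
-- what changed: B replaces A's single-pass state machine (found_root flag, three duplicated inline emit blocks) by recursive delimiter splitting with slices: split the segment list at corrupted segments, then split each run at every root after its first, then join and filter the groups in separate passes.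
import Mathlib
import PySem

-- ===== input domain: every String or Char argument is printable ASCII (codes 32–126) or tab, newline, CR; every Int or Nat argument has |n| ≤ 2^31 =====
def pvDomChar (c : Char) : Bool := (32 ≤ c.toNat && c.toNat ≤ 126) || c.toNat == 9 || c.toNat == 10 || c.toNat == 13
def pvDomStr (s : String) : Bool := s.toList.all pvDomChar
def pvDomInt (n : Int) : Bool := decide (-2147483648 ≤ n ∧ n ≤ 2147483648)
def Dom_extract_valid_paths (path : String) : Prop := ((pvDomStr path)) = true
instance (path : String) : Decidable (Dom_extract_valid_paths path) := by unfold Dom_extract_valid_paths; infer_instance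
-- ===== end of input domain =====

-- B replaces A's one-pass state machine (found_root flag, inline emission) by recursive
-- delimiter splitting: slice the segment list at corrupted segments, then slice each run at
-- every root after its first, then join and filter in separate passes; same cost, alternative.

-- ===== PORT A =====
def has_corrupted_chars (text : String) : Bool :=
  text.toList.any (fun c =>
    c.toNat < 0x20 || (0x7F ≤ c.toNat && c.toNat ≤ 0x9F) || c == '\ufffd')

def is_path_root (segment : String) : Bool :=
  (segment == "data" || segment == "sdcard" || segment == "storage")
  || PySem.Str.startswith segment "emulated"

-- A's inline "save current_path" block (used at corrupted segment, new root, and at the end)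
def pvEmitA (results cur : List String) : List String :=
  if !cur.isEmpty && decide (cur.length > 1) then
    let path_str := PySem.Str.join "/" cur
    if path_str != "" && path_str != "/" then results ++ [path_str] else results
  else results

def pvStepA (st : List String × List String × Bool) (seg : String) :
    List String × List String × Bool :=
  match st with
  | (results, cur, fr) =>
    if seg == "" then (results, cur ++ [seg], fr)
    else if has_corrupted_chars seg then (pvEmitA results cur, [], false)
    else if fr && is_path_root seg then (pvEmitA results cur, ["", seg], true)
    else (results, cur ++ [seg], if is_path_root seg then true else fr)

def extract_valid_paths (path : String) : List String :=
  if path == "" then []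
  else
    let segments := (PySem.Str.split? path "/").getD []
    let st := segments.foldl pvStepA ([], [], false)
    pvEmitA st.1 st.2.1

-- ===== PORT B =====
-- Source B _runs: corrupted segments act as delimiters; split the list on them recursively
def pvRuns (segs : List String) : List (List String) :=
  match h : segs.findIdx? has_corrupted_chars with
  | some i => segs.take i :: pvRuns (segs.drop (i + 1))
  | none => [segs]
termination_by segs.length
decreasing_by
  have := (List.findIdx?_eq_some_iff_findIdx_eq.mp h).1
  simp only [List.length_drop]; omega

-- Source B _chop: each root found in rest closes the pending group and opens a ''-prefixed one
def pvChop (acc rest : List String) : List (List String) :=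
  match h : rest.findIdx? is_path_root with
  | some i => (acc ++ rest.take i) :: pvChop ([""] ++ [rest.getD i ""]) (rest.drop (i + 1))
  | none => [acc ++ rest]
termination_by rest.length
decreasing_by
  have := (List.findIdx?_eq_some_iff_findIdx_eq.mp h).1
  simp only [List.length_drop]; omega

-- Source B _groups: the first group extends through the first root, then chop
def pvGroups (run : List String) : List (List String) :=
  match run.findIdx? is_path_root with
  | some i => pvChop (run.take (i + 1)) (run.drop (i + 1))
  | none => [run]

def extract_valid_paths_alt (path : String) : List String :=
  if path == "" then []
  else
    let segs := (PySem.Str.split? path "/").getD []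
    let groups := (pvRuns segs).flatMap pvGroups
    let paths := (groups.filter (fun g => decide (g.length > 1))).map
      (fun g => PySem.Str.join "/" g)
    paths.filter (fun p => p != "" && p != "/")

-- ===== PRECONDITION & SPEC =====
def Spec_extract_valid_paths (path : String) (out : List String) : Prop := out = extract_valid_paths_alt path
instance (path : String) (out : List String) : Decidable (Spec_extract_valid_paths path out) := by unfold Spec_extract_valid_paths; infer_instance

-- ===== CLAIM (what is proved, stated in full; the proofs are below) =====
def Claim_equal_extract_valid_paths : Prop := ∀ (path : String), Dom_extract_valid_paths path → Spec_extract_valid_paths path (extract_valid_paths path)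

-- ===== LEMMAS AND PROOFS =====

-- valid-group formatter: the option-valued version of A's emit / B's filter-map-filter pipeline
def pvJoinValid (g : List String) : Option String :=
  if g.length > 1 then
    let s := PySem.Str.join "/" g
    if s != "" && s != "/" then some s else none
  else none

-- group-level recursive characterisation of A's loop
def pvGsplit : List String → List String → Bool → List (List String)
  | [], cur, _ => [cur]
  | s :: rest, cur, fr =>
    if has_corrupted_chars s then cur :: pvGsplit rest [] false
    else if fr && is_path_root s then cur :: pvGsplit rest ["", s] true
    else pvGsplit rest (cur ++ [s]) (fr || is_path_root s)

-- B's grouping of one run carrying A's pending group `cur` and flag `fr`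
def pvCtx (run cur : List String) (fr : Bool) : List (List String) :=
  if fr then pvChop cur run
  else
    match run.findIdx? is_path_root with
    | some i => pvChop (cur ++ run.take (i + 1)) (run.drop (i + 1))
    | none => [cur ++ run]

-- B's whole pipeline at group level, carrying `cur`/`fr` into the first run
def pvH (segs cur : List String) (fr : Bool) : List (List String) :=
  match pvRuns segs with
  | [] => []
  | r :: rs => pvCtx r cur fr ++ rs.flatMap pvGroups

theorem corrupted_empty : has_corrupted_chars "" = false := by decide

theorem root_empty : is_path_root "" = false := by decide

theorem pvEmitA_eq (results cur : List String) :
    pvEmitA results cur = results ++ (pvJoinValid cur).toList := by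
  unfold pvEmitA pvJoinValid
  by_cases h1 : cur.length > 1
  · have hne : cur.isEmpty = false := by cases cur <;> simp_all
    simp only [hne, Bool.not_false, h1, decide_true, Bool.and_self, if_true]
    by_cases h2 : (PySem.Str.join "/" cur != "" && PySem.Str.join "/" cur != "/") = true
    · simp [h2]
    · simp only [Bool.not_eq_true] at h2
      simp [h2]
  · have hc : (!cur.isEmpty && decide (cur.length > 1)) = false := by simp [h1]
    simp [h1]

theorem pipeline_step (g : List String) (gs : List (List String)) :
    ((((g :: gs).filter (fun g => decide (g.length > 1))).map
        (fun g => PySem.Str.join "/" g)).filter (fun p => p != "" && p != "/"))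
      = (pvJoinValid g).toList
        ++ (((gs.filter (fun g => decide (g.length > 1))).map
              (fun g => PySem.Str.join "/" g)).filter (fun p => p != "" && p != "/")) := by
  unfold pvJoinValid
  by_cases h1 : g.length > 1
  · simp only [List.filter_cons, h1, decide_true, if_true, List.map_cons]
    by_cases h2 : (PySem.Str.join "/" g != "" && PySem.Str.join "/" g != "/") = true
    · simp [h2]
    · simp only [Bool.not_eq_true] at h2
      simp [h2]
  · have hq : (decide (g.length > 1)) = false := by simp [h1]
    simp [hq, h1]

theorem pipeline_eq (groups : List (List String)) :
    ((groups.filter (fun g => decide (g.length > 1))).map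
        (fun g => PySem.Str.join "/" g)).filter (fun p => p != "" && p != "/")
      = groups.filterMap pvJoinValid := by
  induction groups with
  | nil => rfl
  | cons g gs ih =>
    rw [pipeline_step, ih, List.filterMap_cons]
    cases pvJoinValid g <;> simp

theorem foldA (segs : List String) (results cur : List String) (fr : Bool) :
    pvEmitA (segs.foldl pvStepA (results, cur, fr)).1
        (segs.foldl pvStepA (results, cur, fr)).2.1
      = results ++ (pvGsplit segs cur fr).filterMap pvJoinValid := by
  induction segs generalizing results cur fr with
  | nil =>
    rw [List.foldl_nil]
    simp only [pvGsplit, List.filterMap_cons, List.filterMap_nil]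
    rw [pvEmitA_eq]
    cases pvJoinValid cur <;> simp
  | cons s rest ih =>
    simp only [List.foldl_cons]
    by_cases h0 : s = ""
    · subst h0
      simp only [pvStepA, beq_self_eq_true, if_true, pvGsplit, corrupted_empty,
        Bool.false_eq_true, if_false, root_empty, Bool.and_false, Bool.or_false]
      exact ih results (cur ++ [""]) fr
    · have hb0 : (s == "") = false := by simp [h0]
      by_cases h1 : has_corrupted_chars s = true
      · simp only [pvStepA, hb0, Bool.false_eq_true, if_false, h1, if_true, pvGsplit]
        rw [ih (pvEmitA results cur) [] false, pvEmitA_eq, List.filterMap_cons]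
        cases pvJoinValid cur <;> simp
      · have hb1 : has_corrupted_chars s = false := by simp_all
        by_cases h2 : (fr && is_path_root s) = true
        · simp only [pvStepA, hb0, Bool.false_eq_true, if_false, hb1, h2, if_true, pvGsplit]
          rw [ih (pvEmitA results cur) ["", s] true, pvEmitA_eq, List.filterMap_cons]
          cases pvJoinValid cur <;> simp
        · have hb2 : (fr && is_path_root s) = false := by simp_all
          simp only [pvStepA, hb0, Bool.false_eq_true, if_false, hb1, hb2, pvGsplit]
          have he : (if is_path_root s then true else fr) = (fr || is_path_root s) := by
            cases is_path_root s <;> cases fr <;> rfl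
          rw [he]
          exact ih results (cur ++ [s]) (fr || is_path_root s)

theorem pvRuns_eq (segs : List String) :
    pvRuns segs = match segs.findIdx? has_corrupted_chars with
      | some i => segs.take i :: pvRuns (segs.drop (i + 1))
      | none => [segs] := by
  rw [pvRuns]
  split <;> rename_i h <;> simp [h]

theorem pvChop_eq (acc rest : List String) :
    pvChop acc rest = match rest.findIdx? is_path_root with
      | some i => (acc ++ rest.take i) :: pvChop ([""] ++ [rest.getD i ""]) (rest.drop (i + 1))
      | none => [acc ++ rest] := by
  rw [pvChop]
  split <;> rename_i h <;> simp [h]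

theorem pvRuns_ne_nil (segs : List String) : pvRuns segs ≠ [] := by
  rw [pvRuns_eq]
  cases segs.findIdx? has_corrupted_chars <;> simp

theorem pvRuns_cons_bad {s : String} (rest : List String)
    (h : has_corrupted_chars s = true) : pvRuns (s :: rest) = [] :: pvRuns rest := by
  rw [pvRuns_eq]
  simp [List.findIdx?_cons, h]

theorem pvRuns_cons_good {s : String} (rest : List String)
    (h : has_corrupted_chars s = false) :
    ∃ r rs, pvRuns rest = r :: rs ∧ pvRuns (s :: rest) = (s :: r) :: rs := by
  cases hf : rest.findIdx? has_corrupted_chars with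
  | none =>
      refine ⟨rest, [], ?_, ?_⟩
      · rw [pvRuns_eq, hf]
      · rw [pvRuns_eq]; simp [List.findIdx?_cons, h, hf]
  | some i =>
      refine ⟨rest.take i, pvRuns (rest.drop (i + 1)), ?_, ?_⟩
      · rw [pvRuns_eq, hf]
      · rw [pvRuns_eq]
        simp [List.findIdx?_cons, h, hf, List.take_succ_cons, List.drop_succ_cons]

theorem pvChop_cons_root {s : String} (acc r : List String) (h : is_path_root s = true) :
    pvChop acc (s :: r) = acc :: pvChop ["", s] r := by
  rw [pvChop_eq]
  simp [List.findIdx?_cons, h]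

theorem pvChop_cons_nonroot {s : String} (acc r : List String) (h : is_path_root s = false) :
    pvChop acc (s :: r) = pvChop (acc ++ [s]) r := by
  rw [pvChop_eq (acc ++ [s]) r, pvChop_eq acc (s :: r)]
  cases hf : r.findIdx? is_path_root with
  | none => simp [List.findIdx?_cons, h, hf]
  | some i => simp [List.findIdx?_cons, h, hf, List.take_succ_cons, List.drop_succ_cons]

theorem pvCtx_nil (cur : List String) (fr : Bool) : pvCtx [] cur fr = [cur] := by
  unfold pvCtx
  cases fr <;> simp [pvChop_eq]

theorem pvCtx_step (s : String) (r cur : List String) (fr : Bool) :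
    pvCtx (s :: r) cur fr =
      if fr && is_path_root s then cur :: pvCtx r ["", s] true
      else pvCtx r (cur ++ [s]) (fr || is_path_root s) := by
  by_cases hr : is_path_root s = true
  · cases fr with
    | true =>
        simp only [hr, Bool.and_true, if_true, pvCtx, if_true]
        exact pvChop_cons_root cur r hr
    | false =>
        simp only [hr, Bool.false_and, Bool.false_or, if_false, pvCtx,
          Bool.false_eq_true, if_true]
        rw [List.findIdx?_cons, hr]
        simp [List.take_succ_cons, List.drop_succ_cons]
  · have hr' : is_path_root s = false := by simp_all
    have hand : (fr && is_path_root s) = false := by simp [hr']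
    simp only [hr', Bool.or_false]
    cases fr with
    | true =>
        simp only [pvCtx, if_true]
        exact pvChop_cons_nonroot cur r hr'
    | false =>
        simp only [pvCtx, Bool.false_eq_true, if_false]
        rw [List.findIdx?_cons, hr']
        cases hf : r.findIdx? is_path_root with
        | none => simp
        | some i => simp [List.take_succ_cons, List.drop_succ_cons]

theorem pvGroups_eq_ctx (run : List String) : pvGroups run = pvCtx run [] false := by
  unfold pvGroups pvCtx
  simp only [Bool.false_eq_true, if_false]
  cases run.findIdx? is_path_root <;> simp

theorem pvH_base (segs : List String) : pvH segs [] false = (pvRuns segs).flatMap pvGroups := by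
  unfold pvH
  cases h : pvRuns segs with
  | nil => exact absurd h (pvRuns_ne_nil segs)
  | cons r rs => simp [List.flatMap_cons, pvGroups_eq_ctx]

theorem pvGsplit_eq_H (segs cur : List String) (fr : Bool) :
    pvGsplit segs cur fr = pvH segs cur fr := by
  induction segs generalizing cur fr with
  | nil =>
      unfold pvH
      rw [pvRuns_eq]
      simp [pvGsplit, pvCtx_nil]
  | cons s rest ih =>
      by_cases h1 : has_corrupted_chars s = true
      · simp only [pvGsplit, h1, if_true]
        rw [ih, pvH_base]
        unfold pvH
        rw [pvRuns_cons_bad rest h1]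
        simp [pvCtx_nil]
      · have hb1 : has_corrupted_chars s = false := by simp_all
        obtain ⟨r, rs, hrest, hcons⟩ := pvRuns_cons_good rest hb1
        have hH : ∀ c f, pvH rest c f = pvCtx r c f ++ rs.flatMap pvGroups := by
          intro c f; unfold pvH; rw [hrest]
        have hstep : pvH (s :: rest) cur fr
            = pvCtx (s :: r) cur fr ++ rs.flatMap pvGroups := by
          unfold pvH; rw [hcons]
        rw [hstep, pvCtx_step]
        by_cases h2 : (fr && is_path_root s) = true
        · simp only [pvGsplit, hb1, Bool.false_eq_true, if_false, h2, if_true, List.cons_append]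
          rw [ih, hH]
        · have hb2 : (fr && is_path_root s) = false := by simp_all
          simp only [pvGsplit, hb1, hb2, Bool.false_eq_true, if_false]
          rw [ih, hH]

-- ===== VERDICT (by name: the statement is the Claim_ definition above) =====
theorem extract_valid_paths_spec : Claim_equal_extract_valid_paths := by
  intro path _
  unfold Spec_extract_valid_paths extract_valid_paths extract_valid_paths_alt
  by_cases h : path = ""
  · simp [h]
  · have hb : (path == "") = false := by simp [h]
    simp only [hb, Bool.false_eq_true, if_false]
    rw [pipeline_eq, ← pvH_base, ← pvGsplit_eq_H]
    have := foldA ((PySem.Str.split? path "/").getD []) [] [] false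
    simpa using this
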